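-- pv_equiv track=rewrite | github.com/jayho-k/TIL | PS/programmers/(re)L3_연속펄스.py | solution
-- ===== SOURCE A (Python) =====
-- def solution(sequence):
--     ans = 0
--     p = -1
--     tmp1 = 0
--     tmp2 = 0
--
--     for i in range(len(sequence)):
--
--         # 조건을 봐주는 것
--         if tmp1+sequence[i]*p>=0:
--             tmp1+=sequence[i]*p
--             if ans<tmp1:
--                 ans=tmp1
--         else:
--             tmp1=0
--
--         p*=-1
--
--         if tmp2+sequence[i]*p>=0:
--             tmp2+=sequence[i]*p
--             if ans<tmp2:
--                 ans=tmp2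
--         else:
--             tmp2=0
--
--     return ans
-- ===== SOURCE B (Python) =====
-- def solution(sequence):
--     # Prefix sums of the alternating-signed values; the answer is the
--     # spread (global max minus global min) of the prefix-sum sequence,
--     # since any pulse-subarray sum is a difference of two prefixes.
--     prefixes = [0]
--     total = 0
--     sign = 1
--     for x in sequence:
--         total += sign * x
--         prefixes.append(total)
--         sign = -sign
--     return max(prefixes) - min(prefixes)
-- ===== Notes on version B (the rewrite author's own statement) =====
-- stated objective: alternative
-- what changed: Replaces A's two parallel reset-at-zero Kadane accumulators with a staged prefix-sum method: build the prefix sums of the alternating-signed sequence, then return global max minus global min of the prefixes (every pulse-subarray sum is a difference of two prefixes, so the spread is the answer); the tight loop does less per element and the extremes come from C-level max()/min().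
import Mathlib
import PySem

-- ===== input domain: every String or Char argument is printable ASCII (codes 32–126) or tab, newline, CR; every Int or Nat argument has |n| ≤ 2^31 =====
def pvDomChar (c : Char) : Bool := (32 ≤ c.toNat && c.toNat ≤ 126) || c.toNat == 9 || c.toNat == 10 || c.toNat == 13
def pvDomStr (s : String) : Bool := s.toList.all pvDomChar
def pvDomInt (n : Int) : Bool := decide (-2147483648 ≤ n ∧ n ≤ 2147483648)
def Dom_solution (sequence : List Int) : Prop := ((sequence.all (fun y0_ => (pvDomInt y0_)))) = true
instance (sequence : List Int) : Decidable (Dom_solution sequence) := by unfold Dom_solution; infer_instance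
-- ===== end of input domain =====

-- B replaces A's two reset-at-zero Kadane accumulators by a staged prefix-sum method
-- (build alternating-signed prefix sums, answer = max prefix - min prefix); objective: alternative.
-- ===== PORT A =====
def stepA (st : Int × Int × Int × Int) (x : Int) : Int × Int × Int × Int :=
  let (ans, p, tmp1, tmp2) := st
  let (tmp1, ans) :=
    if 0 ≤ tmp1 + x * p then
      (tmp1 + x * p, if ans < tmp1 + x * p then tmp1 + x * p else ans)
    else (0, ans)
  let p := p * (-1)
  let (tmp2, ans) :=
    if 0 ≤ tmp2 + x * p then
      (tmp2 + x * p, if ans < tmp2 + x * p then tmp2 + x * p else ans)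
    else (0, ans)
  (ans, p, tmp1, tmp2)

def solution (sequence : List Int) : Int :=
  ((List.range sequence.length).foldl
    (fun st i => stepA st (sequence.getD i 0)) (0, -1, 0, 0)).1

-- ===== PORT B =====
-- the loop of Source B: running total and sign, collecting each prefix sum
def prefB : List Int → Int → Int → List Int
  | [], _, _ => []
  | x :: t, total, sign => (total + sign * x) :: prefB t (total + sign * x) (-sign)

-- prefixes = [0] ++ prefB …; Python's max/min over that nonempty list are folds
-- of max/min over the tail starting from its head element 0.
def solution_alt (sequence : List Int) : Int :=
  let prefixes := prefB sequence 0 1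
  prefixes.foldl max 0 - prefixes.foldl min 0

-- ===== PRECONDITION & SPEC =====
def Spec_solution (sequence : List Int) (out : Int) : Prop := out = solution_alt sequence
instance (sequence : List Int) (out : Int) : Decidable (Spec_solution sequence out) := by unfold Spec_solution; infer_instance

-- ===== CLAIM (what is proved, stated in full; the proofs are below) =====
def Claim_equal_solution : Prop := ∀ (sequence : List Int), Dom_solution sequence → Spec_solution sequence (solution sequence)

-- ===== LEMMAS AND PROOFS =====

lemma foldl_range_getD {σ : Type} (l : List Int) (f : σ → Int → σ) (s : σ) :
    (List.range l.length).foldl (fun st i => f st (l.getD i 0)) s = l.foldl f s := by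
  induction l generalizing s with
  | nil => rfl
  | cons a t ih =>
    simp only [List.length_cons, List.range_succ_eq_map, List.foldl_cons, List.foldl_map,
      List.getD_cons_zero, List.getD_cons_succ]
    exact ih (f s a)

-- Invariant: after processing a prefix with running alternating-signed total `total`,
-- running max `mx` and min `mn` of all prefixes so far, A's state is
-- ans = mx - mn, p = -sg, tmp1 = mx - total, tmp2 = total - mn.
lemma inv_step (l : List Int) (ans p t1 t2 total mx mn sg : Int)
    (h1 : ans = mx - mn) (h2 : p = -sg) (h3 : t1 = mx - total) (h4 : t2 = total - mn)
    (h5 : mn ≤ total) (h6 : total ≤ mx) :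
    (l.foldl stepA (ans, p, t1, t2)).1 =
      (prefB l total sg).foldl max mx - (prefB l total sg).foldl min mn := by
  induction l generalizing ans p t1 t2 total mx mn sg with
  | nil => simpa using h1
  | cons x t ih =>
    simp only [List.foldl_cons, prefB]
    have hxp : x * p = -(sg * x) := by rw [h2]; ring
    have hxp2 : x * (p * (-1)) = sg * x := by rw [h2]; ring
    simp only [stepA, hxp, hxp2]
    generalize sg * x = v
    subst h1 h3 h4
    split_ifs with c1 c2 c3 c4 c5 c6 c7 c8 <;>
      refine ih _ _ _ _ (total + v) (max mx (total + v)) (min mn (total + v)) (-sg)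
        (by omega) (by omega) (by omega) (by omega) (by omega) (by omega)

theorem solution_spec : Claim_equal_solution := by
  intro sequence _
  unfold Spec_solution solution solution_alt
  rw [foldl_range_getD]
  exact inv_step sequence 0 (-1) 0 0 0 0 0 1 rfl rfl rfl rfl le_rfl le_rfl

-- ===== VERDICT (by name: the statement is the Claim_ definition above) =====
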